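-- pv_equiv track=rewrite | github.com/lucasXiaofan/cs520_exercise2 | exercise1_multi_solution_variants/problem_4.py | minSwaps_gemini_self_planning
-- ===== SOURCE A (Python) =====
-- from typing import List
--
-- def minSwaps_gemini_self_planning(grid: List[List[int]]) -> int:
--     n = len(grid)
--     trailing_zeros = []
--     for row in grid:
--         count = 0
--         for i in range(n - 1, -1, -1):
--             if row[i] == 0:
--                 count += 1
--             else:
--                 break
--         trailing_zeros.append(count)
--
--     swaps = 0
--     for i in range(n):
--         required_zeros = n - 1 - i
--         j = i
--         while j < n and trailing_zeros[j] < required_zeros: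
--             j += 1
--
--         if j == n:
--             return -1
--
--         for k in range(j, i, -1):
--             trailing_zeros[k], trailing_zeros[k - 1] = trailing_zeros[k - 1], trailing_zeros[k]
--             swaps += 1
--
--     return swaps
-- ===== SOURCE B (Python) =====
-- def minSwaps_gemini_self_planning(grid):
--     n = len(grid)
--     counts = []
--     for row in grid:
--         k = n
--         while k > 0 and row[k - 1] == 0:
--             k -= 1
--         counts.append(n - k)
--
--     def solve(rem):
--         if not rem:
--             return 0
--         need = len(rem) - 1
--         j = 0
--         for t in rem:
--             if t >= need:
--                 break
--             j += 1
--         else: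
--             return -1
--         sub = solve(rem[:j] + rem[j + 1:])
--         if sub == -1:
--             return -1
--         return j + sub
--
--     return solve(counts)
-- ===== Notes on version B (the rewrite author's own statement) =====
-- stated objective: alternative
-- what changed: B computes each trailing-zero count with a shrinking while-loop and replaces A's in-place greedy (scanning from i, bubbling the chosen row forward with explicit adjacent swaps on a mutated array, counting each swap) by a pure recursion on the list of remaining counts: find the first eligible count, add its position, and recurse on the list with that element sliced out; no array mutation or index bookkeeping over a mutated buffer.
import Mathlib
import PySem

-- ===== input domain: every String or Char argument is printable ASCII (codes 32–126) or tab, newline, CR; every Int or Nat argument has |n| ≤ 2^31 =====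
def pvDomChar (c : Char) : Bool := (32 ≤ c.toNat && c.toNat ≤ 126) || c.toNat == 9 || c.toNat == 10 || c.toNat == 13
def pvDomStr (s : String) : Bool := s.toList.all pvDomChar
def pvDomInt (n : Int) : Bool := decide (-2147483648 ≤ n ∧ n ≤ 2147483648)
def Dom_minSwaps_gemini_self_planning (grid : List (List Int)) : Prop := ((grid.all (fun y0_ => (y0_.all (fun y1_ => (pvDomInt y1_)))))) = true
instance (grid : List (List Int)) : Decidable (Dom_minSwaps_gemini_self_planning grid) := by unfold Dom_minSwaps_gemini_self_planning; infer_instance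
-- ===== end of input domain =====

-- B replaces A's in-place greedy (bubbling the chosen row to the front with adjacent swaps on a
-- mutated array, indices i/j/k) by a recursion on the list of remaining counts: find the first
-- eligible count, recurse on the list with it removed, add its position (objective: alternative).

-- ===== PORT A =====
-- backward scan 'for i in range(n-1,-1,-1): if row[i]==0: count+=1 else: break'
-- (pyGetD is exact here: under Pre_ every index accessed is in range)
def pvA_count (row : List Int) : List Int → Int
  | [] => 0
  | i :: rest => if PySem.List.pyGetD row i 0 == 0 then 1 + pvA_count row rest else 0

-- 'while j < n and trailing_zeros[j] < required_zeros: j += 1'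
def pvA_findJ (tz : List Int) (n : Nat) (req : Int) (j : Nat) : Nat :=
  if _h : j < n then
    if PySem.List.pyGetD tz (j : Int) 0 < req then pvA_findJ tz n req (j + 1) else j
  else j
termination_by n - j

-- 'for k in range(j, i, -1): tz[k], tz[k-1] = tz[k-1], tz[k]; swaps += 1'
-- (pySetD is exact here: under Pre_ both written indices are in range)
def pvA_swapLoop (tz : List Int) (swaps : Int) : List Int → List Int × Int
  | [] => (tz, swaps)
  | k :: rest =>
      pvA_swapLoop
        (PySem.List.pySetD (PySem.List.pySetD tz k (PySem.List.pyGetD tz (k - 1) 0))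
          (k - 1) (PySem.List.pyGetD tz k 0)) (swaps + 1) rest

-- 'for i in range(n): …' with the early 'return -1'
def pvA_outer (tz : List Int) (swaps : Int) (n : Nat) (i : Nat) : Int :=
  if _h : i < n then
    if pvA_findJ tz n ((n : Int) - 1 - (i : Int)) i = n then -1
    else
      pvA_outer
        (pvA_swapLoop tz swaps
          (PySem.List.pyRange ((pvA_findJ tz n ((n : Int) - 1 - (i : Int)) i : Nat) : Int) (i : Int) (-1))).1
        (pvA_swapLoop tz swaps
          (PySem.List.pyRange ((pvA_findJ tz n ((n : Int) - 1 - (i : Int)) i : Nat) : Int) (i : Int) (-1))).2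
        n (i + 1)
  else swaps
termination_by n - i

def minSwaps_gemini_self_planning (grid : List (List Int)) : Int :=
  pvA_outer
    (grid.map (fun row => pvA_count row (PySem.List.pyRange ((grid.length : Int) - 1) (-1) (-1))))
    0 grid.length 0

-- ===== PORT B =====
-- 'k = n; while k > 0 and row[k - 1] == 0: k -= 1'  (the tested index k-1 is written as its value k' for k = k'+1)
def pvB_k (row : List Int) : Nat → Nat
  | 0 => 0
  | k + 1 => if PySem.List.pyGetD row ((k : Nat) : Int) 0 == 0 then pvB_k row k else k + 1

-- 'j = 0; for t in rem: if t >= need: break; j += 1; else: return -1' as an Option-valued scan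
def pvB_scan (need : Int) : Nat → List Int → Option Nat
  | _, [] => none
  | j, t :: rest => if need ≤ t then some j else pvB_scan need (j + 1) rest

-- 'def solve(rem)'; the recursion is encoded on a fuel argument that is always rem.length
-- (each recursive call is on a list one element shorter)
def pvB_solve : Nat → List Int → Int
  | 0, _ => 0
  | m + 1, rem =>
      match pvB_scan ((rem.length : Int) - 1) 0 rem with
      | none => -1
      | some j =>
          let sub := pvB_solve m
            (PySem.List.slice rem none (some ((j : Nat) : Int)) ++
             PySem.List.slice rem (some (((j : Nat) : Int) + 1)) none)
          if sub = -1 then -1 else (j : Int) + sub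

def minSwaps_gemini_self_planning_alt (grid : List (List Int)) : Int :=
  pvB_solve
    (grid.map (fun row => (grid.length : Int) - (pvB_k row grid.length : Int))).length
    (grid.map (fun row => (grid.length : Int) - (pvB_k row grid.length : Int)))

-- ===== PRECONDITION & SPEC =====
-- Pre_ excludes exactly the grids in which some row is shorter than the number of rows:
-- there A raises IndexError at row[n-1] (A returns on every input Pre_ admits).
def Pre_minSwaps_gemini_self_planning (grid : List (List Int)) : Prop :=
  ∀ row ∈ grid, grid.length ≤ row.length
instance (grid : List (List Int)) : Decidable (Pre_minSwaps_gemini_self_planning grid) := by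
  unfold Pre_minSwaps_gemini_self_planning; infer_instance
def pvWitness_minSwaps_gemini_self_planning : List (List Int) := [[1, 0], [0, 0]]

def Spec_minSwaps_gemini_self_planning (grid : List (List Int)) (out : Int) : Prop := out = minSwaps_gemini_self_planning_alt grid
instance (grid : List (List Int)) (out : Int) : Decidable (Spec_minSwaps_gemini_self_planning grid out) := by unfold Spec_minSwaps_gemini_self_planning; infer_instance

-- ===== CLAIM (what is proved, stated in full; the proofs are below) =====
def Claim_equal_minSwaps_gemini_self_planning : Prop := ∀ (grid : List (List Int)), Dom_minSwaps_gemini_self_planning grid → Pre_minSwaps_gemini_self_planning grid → Spec_minSwaps_gemini_self_planning grid (minSwaps_gemini_self_planning grid)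

-- ===== LEMMAS AND PROOFS =====

-- the two trailing-zero computations agree
theorem pv_count_eq (row : List Int) :
    ∀ n : Nat, pvA_count row (PySem.List.pyRange ((n : Int) - 1) (-1) (-1))
      = (n : Int) - (pvB_k row n : Int) := by
  intro n
  induction n with
  | zero =>
      rw [PySem.List.pyRange_neg_one_eq_nil (by omega)]
      simp [pvA_count, pvB_k]
  | succ n ih =>
      have hc : ((n + 1 : Nat) : Int) - 1 = (n : Int) := by push_cast; ring
      rw [hc, PySem.List.pyRange_neg_one_cons (by omega)]
      unfold pvA_count pvB_k
      by_cases h : PySem.List.pyGetD row (n : Int) 0 = 0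
      · rw [if_pos (by simpa using h), if_pos (by simpa using h)]
        rw [ih]; push_cast; ring
      · rw [if_neg (by simpa using h), if_neg (by simpa using h)]
        push_cast; ring

theorem pv_swap_erase (tz : List Int) (j : Nat) (h1 : 1 ≤ j) (h2 : j < tz.length) :
    ((tz.set j (tz.getD (j-1) 0)).set (j-1) (tz.getD j 0)).eraseIdx (j-1) = tz.eraseIdx j := by
  apply List.ext_getElem
  · simp only [List.length_eraseIdx, List.length_set]
    split_ifs <;> omega
  · intro k hk1 hk2
    have hklen : k < tz.length - 1 := by
      rw [List.length_eraseIdx, if_pos h2] at hk2; exact hk2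
    by_cases hkj : k < j - 1
    · rw [List.getElem_eraseIdx_of_lt _ hkj, List.getElem_eraseIdx_of_lt _ (by omega)]
      rw [List.getElem_set_ne (by omega), List.getElem_set_ne (by omega)]
    · by_cases hk : k = j - 1
      · subst hk
        rw [List.getElem_eraseIdx_of_ge _ (by omega), List.getElem_eraseIdx_of_lt _ (by omega)]
        rw [List.getElem_set_ne (by omega)]
        simp only [show j - 1 + 1 = j from by omega]
        rw [List.getElem_set_self]
        rw [List.getD_eq_getElem _ _ (by omega)]
      · rw [List.getElem_eraseIdx_of_ge _ (by omega), List.getElem_eraseIdx_of_ge _ (by omega)]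
        rw [List.getElem_set_ne (by omega), List.getElem_set_ne (by omega)]

theorem pv_swap_eq (i : Nat) :
    ∀ d : Nat, ∀ tz : List Int, ∀ swaps : Int, i + d < tz.length →
      pvA_swapLoop tz swaps (PySem.List.pyRange ((i + d : Nat) : Int) (i : Int) (-1))
      = ((tz.eraseIdx (i + d)).take i ++ tz.getD (i + d) 0 :: (tz.eraseIdx (i + d)).drop i,
         swaps + (d : Int)) := by
  intro d
  induction d with
  | zero =>
      intro tz swaps h
      rw [PySem.List.pyRange_neg_one_eq_nil (by simp)]
      unfold pvA_swapLoop
      simp only [Nat.add_zero] at h ⊢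
      have ht : (tz.eraseIdx i).take i = tz.take i := by
        rw [List.eraseIdx_eq_take_drop_succ, List.take_append]
        simp [List.length_take, Nat.le_of_lt h, List.take_take]
      have hd : (tz.eraseIdx i).drop i = tz.drop (i+1) := by
        rw [List.eraseIdx_eq_take_drop_succ, List.drop_append]
        simp [List.length_take, Nat.le_of_lt h]
      rw [ht, hd, List.getD_eq_getElem _ _ h, List.getElem_cons_drop, List.take_append_drop]
      simp
  | succ d ih =>
      intro tz swaps h
      rw [PySem.List.pyRange_neg_one_cons (by push_cast; omega)]
      unfold pvA_swapLoop
      have hc1 : ((i + (d+1) : Nat) : Int) - 1 = ((i + d : Nat) : Int) := by push_cast; ring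
      simp only [hc1, PySem.List.pyGetD_natCast, PySem.List.pySetD_natCast]
      set tz' := (tz.set (i + (d+1)) (tz.getD (i + d) 0)).set (i + d) (tz.getD (i + (d+1)) 0) with htz'
      have hlen' : tz'.length = tz.length := by simp [htz']
      have := ih tz' (swaps + 1) (by omega)
      rw [this]
      have herase : tz'.eraseIdx (i + d) = tz.eraseIdx (i + (d+1)) := by
        have := pv_swap_erase tz (i + (d+1)) (by omega) h
        simpa [show i + (d+1) - 1 = i + d from by omega] using this
      have hgd : tz'.getD (i + d) 0 = tz.getD (i + (d+1)) 0 := by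
        rw [htz', List.getD_eq_getElem _ _ (by simp only [List.length_set]; omega), List.getElem_set_self]
      rw [herase, hgd]
      congr 1
      push_cast; ring

theorem pv_scan_bounds (need : Int) :
    ∀ rem : List Int, ∀ j k : Nat, pvB_scan need j rem = some k → j ≤ k ∧ k < j + rem.length := by
  intro rem
  induction rem with
  | nil => intro j k h; simp [pvB_scan] at h
  | cons t rest ih =>
      intro j k h
      unfold pvB_scan at h
      split_ifs at h with hc
      · cases h; constructor <;> simp
      · have := ih (j + 1) k h
        constructor <;> [omega; (simp only [List.length_cons]; omega)]

theorem pv_scan_shift (need : Int) :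
    ∀ rem : List Int, ∀ j : Nat,
      pvB_scan need j rem = (pvB_scan need 0 rem).map (fun k => k + j) := by
  intro rem
  induction rem with
  | nil => intro j; simp [pvB_scan]
  | cons t rest ih =>
      intro j
      unfold pvB_scan
      split_ifs with hc
      · simp
      · rw [ih (j + 1), ih 1, Option.map_map]
        congr 1
        funext k
        simp; omega

theorem pv_findJ_scan (n : Nat) (req : Int) :
    ∀ d j : Nat, ∀ tzA : List Int, tzA.length = n → n - j ≤ d → j ≤ n →
      pvA_findJ tzA n req j
        = (match pvB_scan req j (tzA.drop j) with | some k => k | none => n) := by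
  intro d
  induction d with
  | zero =>
      intro j tzA hlen hd hj
      have hj' : j = n := by omega
      subst hj'
      rw [List.drop_of_length_le (by omega)]
      unfold pvA_findJ
      rw [dif_neg (by omega)]
      simp [pvB_scan]
  | succ d ih =>
      intro j tzA hlen hd hj
      by_cases hjn : j < n
      · have hdrop : tzA.drop j = tzA[j]'(by omega) :: tzA.drop (j + 1) :=
          List.drop_eq_getElem_cons (by omega)
        rw [hdrop]
        unfold pvA_findJ pvB_scan
        rw [dif_pos hjn]
        have hg : PySem.List.pyGetD tzA (j : Int) 0 = tzA[j]'(by omega) := by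
          rw [PySem.List.pyGetD_natCast, List.getD_eq_getElem _ _ (by omega)]
        rw [hg]
        by_cases hc : req ≤ tzA[j]'(by omega)
        · rw [if_pos hc, if_neg (not_lt.mpr hc)]
        · rw [if_neg hc, if_pos (lt_of_not_ge hc)]
          exact ih (j + 1) tzA hlen (by omega) (by omega)
      · have hj' : j = n := by omega
        subst hj'
        rw [List.drop_of_length_le (by omega)]
        unfold pvA_findJ
        rw [dif_neg (by omega)]
        simp [pvB_scan]

theorem pv_solve_nonneg : ∀ m : Nat, ∀ rem : List Int,
    pvB_solve m rem = -1 ∨ 0 ≤ pvB_solve m rem := by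
  intro m
  induction m with
  | zero => intro rem; right; simp [pvB_solve]
  | succ m ih =>
      intro rem
      unfold pvB_solve
      cases hscan : pvB_scan ((rem.length : Int) - 1) 0 rem with
      | none => left; rfl
      | some j =>
          dsimp only
          split_ifs with hs
          · left; rfl
          · right
            rcases ih (PySem.List.slice rem none (some ((j : Nat) : Int)) ++
                PySem.List.slice rem (some (((j : Nat) : Int) + 1)) none) with h | h
            · exact absurd h hs
            · positivity

theorem pv_drop_eraseIdx : ∀ (i k : Nat) (l : List Int),
    (l.eraseIdx (i + k)).drop i = (l.drop i).eraseIdx k := by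
  intro i
  induction i with
  | zero => intro k l; simp
  | succ i ih =>
      intro k l
      cases l with
      | nil => simp
      | cons x xs =>
          rw [show i + 1 + k = (i + k) + 1 from by omega, List.eraseIdx_cons_succ,
            List.drop_succ_cons, List.drop_succ_cons]
          exact ih k xs

theorem pv_bridge (n : Nat) :
    ∀ d i : Nat, ∀ tzA : List Int, ∀ swaps : Int, n - i ≤ d → i ≤ n → tzA.length = n →
      pvA_outer tzA swaps n i =
        (if pvB_solve (n - i) (tzA.drop i) = -1 then -1
         else swaps + pvB_solve (n - i) (tzA.drop i)) := by
  intro d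
  induction d with
  | zero =>
      intro i tzA swaps hd hi hlen
      rw [show n - i = 0 from by omega]
      unfold pvA_outer
      rw [dif_neg (by omega)]
      simp [pvB_solve]
  | succ d ih =>
      intro i tzA swaps hd hi hlen
      by_cases hin : i < n
      · set rem := tzA.drop i with hrem
        have hremlen : rem.length = n - i := by simp [hrem, hlen]
        have hni : n - i = (n - (i + 1)) + 1 := by omega
        have hreq : (rem.length : Int) - 1 = (n : Int) - 1 - (i : Int) := by
          rw [hremlen]; omega
        set req := (n : Int) - 1 - (i : Int) with hreqdef
        have hfind := pv_findJ_scan n req (n - i) i tzA hlen (le_refl _) (by omega)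
        rw [pv_scan_shift] at hfind
        -- unfold one step of pvB_solve
        rw [hni]
        unfold pvA_outer pvB_solve
        rw [dif_pos hin, hreq, ← hreqdef]
        cases hscan : pvB_scan req 0 rem with
        | none =>
            rw [hscan] at hfind
            simp only [Option.map_none] at hfind
            rw [if_pos hfind]
            simp
        | some k0 =>
            rw [hscan] at hfind
            simp only [Option.map_some] at hfind
            have hb := pv_scan_bounds req rem 0 k0 hscan
            have hjlt : k0 + i < n := by omega
            have hne : pvA_findJ tzA n req i ≠ n := by rw [hfind]; exact Nat.ne_of_lt hjlt
            rw [if_neg hne, hfind]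
            have hs := pv_swap_eq i k0 tzA swaps (by rw [hlen]; omega)
            rw [show i + k0 = k0 + i from by omega] at hs
            rw [hs]
            dsimp only
            -- recurse via ih
            have hlen' : ((tzA.eraseIdx (k0 + i)).take i ++
                tzA.getD (k0 + i) 0 :: (tzA.eraseIdx (k0 + i)).drop i).length = n := by
              simp only [List.length_append, List.length_take, List.length_cons,
                List.length_drop, List.length_eraseIdx, if_pos (show k0 + i < tzA.length from by omega)]
              omega
            have hih := ih (i + 1)
              ((tzA.eraseIdx (k0 + i)).take i ++
                tzA.getD (k0 + i) 0 :: (tzA.eraseIdx (k0 + i)).drop i)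
              (swaps + (k0 : Int)) (by omega) (by omega) hlen'
            rw [hih]
            have htake : ((tzA.eraseIdx (k0 + i)).take i).length = i := by
              rw [List.length_take, List.length_eraseIdx,
                if_pos (show k0 + i < tzA.length from by omega)]
              omega
            have hdrop' : ((tzA.eraseIdx (k0 + i)).take i ++
                tzA.getD (k0 + i) 0 :: (tzA.eraseIdx (k0 + i)).drop i).drop (i + 1)
                = rem.eraseIdx k0 := by
              rw [show ((tzA.eraseIdx (k0 + i)).take i ++
                    tzA.getD (k0 + i) 0 :: (tzA.eraseIdx (k0 + i)).drop i)
                  = ((tzA.eraseIdx (k0 + i)).take i ++ [tzA.getD (k0 + i) 0]) ++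
                    (tzA.eraseIdx (k0 + i)).drop i from by simp]
              rw [List.drop_left' (by simp [htake]), show k0 + i = i + k0 from by omega,
                pv_drop_eraseIdx]
            simp only [hdrop']
            have hslice : PySem.List.slice rem none (some ((k0 : Nat) : Int)) ++
                PySem.List.slice rem (some (((k0 : Nat) : Int) + 1)) none = rem.eraseIdx k0 := by
              rw [PySem.List.slice_to_natCast,
                show ((k0 : Nat) : Int) + 1 = ((k0 + 1 : Nat) : Int) from by push_cast; ring,
                PySem.List.slice_from_natCast, List.eraseIdx_eq_take_drop_succ]
            simp only [hslice]
            set sub := pvB_solve (n - (i + 1)) (rem.eraseIdx k0) with hsub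
            by_cases hsm : sub = -1
            · simp [hsm]
            · rcases pv_solve_nonneg (n - (i + 1)) (rem.eraseIdx k0) with h | hpos
              · exact absurd h hsm
              · rw [if_neg hsm, if_neg hsm,
                  if_neg (show ¬((k0 : Int) + sub = -1) from by omega)]
                ring
      · rw [show n - i = 0 from by omega]
        unfold pvA_outer
        rw [dif_neg (by omega)]
        simp [pvB_solve]

-- ===== VERDICT (by name: the statement is the Claim_ definition above) =====
theorem minSwaps_gemini_self_planning_spec : Claim_equal_minSwaps_gemini_self_planning := by
  intro grid _ _
  unfold Spec_minSwaps_gemini_self_planning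
  unfold minSwaps_gemini_self_planning minSwaps_gemini_self_planning_alt
  have hmap : grid.map (fun row => pvA_count row (PySem.List.pyRange ((grid.length : Int) - 1) (-1) (-1)))
      = grid.map (fun row => (grid.length : Int) - (pvB_k row grid.length : Int)) := by
    apply List.map_congr_left
    intro row _
    exact pv_count_eq row grid.length
  rw [hmap]
  set tz := grid.map (fun row => (grid.length : Int) - (pvB_k row grid.length : Int)) with htz
  have hlen : tz.length = grid.length := by simp [htz]
  have := pv_bridge grid.length grid.length 0 tz 0 (by omega) (by omega) hlen
  rw [this, hlen]
  simp only [List.drop_zero, Nat.sub_zero]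
  split_ifs with h
  · rw [h]
  · ring
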